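-- pv_equiv track=rewrite | github.com/Sprinterzzj/Effective-Python | Python-in-Practice/saved_script/Abstract Factory Pattern.py | _create_rectangle
-- ===== SOURCE A (Python) =====
-- BLANK = " "
--
-- CORNER = "+"
--
-- HORIZONTAL = "-"
--
-- VERTICAL = "|"
--
-- def _create_rectangle(width, height, fill=BLANK):
--    """首先生成一个由空串组成的矩阵然后依次填入元素
--    """
--    #产生空字符串框
--    rows = [[fill for _ in range(width)] for _ in range(height)]
--    #在每一列的首尾填充
--    for x in range(1, width - 1):
--        rows[0][x] = HORIZONTAL
--        rows[height - 1][x] = HORIZONTAL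
--    #在没一行的收尾填充
--    for y in range(1, height - 1):
--        rows[y][0] = VERTICAL
--        rows[y][width - 1] = VERTICAL
--    #在四个角填充
--    for y, x in ((0, 0), (0, width - 1),
--                 (height - 1, 0), (height - 1, width - 1)):
--        rows[y][x] = CORNER
--    return rows
-- ===== SOURCE B (Python) =====
-- BLANK = " "
--
-- CORNER = "+"
--
-- HORIZONTAL = "-"
--
-- VERTICAL = "|"
--
-- def _create_rectangle(width, height, fill=BLANK):
--     """Single pass: classify each cell purely by its position."""
--     top = height - 1
--     right = width - 1
--     def cell(y, x):
--         on_h = y == 0 or y == top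
--         on_v = x == 0 or x == right
--         if on_h and on_v:
--             return CORNER
--         if on_h:
--             return HORIZONTAL
--         if on_v:
--             return VERTICAL
--         return fill
--     return [[cell(y, x) for x in range(width)] for y in range(height)]
-- ===== Notes on version B (the rewrite author's own statement) =====
-- stated objective: simpler
-- what changed: B classifies every cell directly from its coordinates in one comprehension pass instead of allocating a fill grid and mutating it in three patch loops.
import Mathlib
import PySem

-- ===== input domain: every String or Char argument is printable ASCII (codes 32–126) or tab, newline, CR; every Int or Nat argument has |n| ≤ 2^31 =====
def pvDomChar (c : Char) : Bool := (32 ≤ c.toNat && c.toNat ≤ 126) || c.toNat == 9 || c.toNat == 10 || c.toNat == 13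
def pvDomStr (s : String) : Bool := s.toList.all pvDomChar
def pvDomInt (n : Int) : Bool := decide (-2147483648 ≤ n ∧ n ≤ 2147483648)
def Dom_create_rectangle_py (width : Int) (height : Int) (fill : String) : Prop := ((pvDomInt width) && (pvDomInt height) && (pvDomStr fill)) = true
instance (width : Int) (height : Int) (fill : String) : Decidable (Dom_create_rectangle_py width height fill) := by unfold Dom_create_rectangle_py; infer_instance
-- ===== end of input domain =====

-- B replaces A's allocate-then-patch mutation passes by one per-cell positional classification (objective: simpler).

-- ===== PORT A =====
-- rows[y][x] = v  (Python nested index assignment; total form — out-of-range is a no-op,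
-- which only happens outside Pre_, exactly where the Python raises IndexError)
def pySet2 (rows : List (List String)) (y x : Int) (v : String) : List (List String) :=
  PySem.List.pySetD rows y (PySem.List.pySetD (PySem.List.pyGetD rows y []) x v)

def create_rectangle_py (width : Int) (height : Int) (fill : String) : List (List String) :=
  -- rows = [[fill for _ in range(width)] for _ in range(height)]
  let rows0 := (PySem.List.pyRange 0 height 1).map
    (fun _ => (PySem.List.pyRange 0 width 1).map (fun _ => fill))
  -- for x in range(1, width-1): rows[0][x] = '-'; rows[height-1][x] = '-'
  let rows1 := (PySem.List.pyRange 1 (width - 1) 1).foldl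
    (fun r x => pySet2 (pySet2 r 0 x "-") (height - 1) x "-") rows0
  -- for y in range(1, height-1): rows[y][0] = '|'; rows[y][width-1] = '|'
  let rows2 := (PySem.List.pyRange 1 (height - 1) 1).foldl
    (fun r y => pySet2 (pySet2 r y 0 "|") y (width - 1) "|") rows1
  -- for (y, x) in ((0,0), (0,width-1), (height-1,0), (height-1,width-1)): rows[y][x] = '+'
  [((0:Int),(0:Int)), (0, width - 1), (height - 1, 0), (height - 1, width - 1)].foldl
    (fun r p => pySet2 r p.1 p.2 "+") rows2

-- ===== PORT B =====
def cellB (width : Int) (height : Int) (fill : String) (y x : Int) : String :=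
  let onH := y == 0 || y == height - 1
  let onV := x == 0 || x == width - 1
  if onH && onV then "+"
  else if onH then "-"
  else if onV then "|"
  else fill

def create_rectangle_py_alt (width : Int) (height : Int) (fill : String) : List (List String) :=
  (PySem.List.pyRange 0 height 1).map
    (fun y => (PySem.List.pyRange 0 width 1).map (fun x => cellB width height fill y x))

-- ===== PRECONDITION & SPEC =====
-- Pre_ excludes exactly the inputs where A raises IndexError (width ≤ 0 or height ≤ 0: the patch loops index an empty grid).
def Pre_create_rectangle_py (width : Int) (height : Int) (fill : String) : Prop :=
  1 ≤ width ∧ 1 ≤ height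
instance (width : Int) (height : Int) (fill : String) : Decidable (Pre_create_rectangle_py width height fill) := by unfold Pre_create_rectangle_py; infer_instance

def pvWitness_create_rectangle_py : Int × Int × String := (1, 1, " ")

def Spec_create_rectangle_py (width : Int) (height : Int) (fill : String) (out : List (List String)) : Prop := out = create_rectangle_py_alt width height fill
instance (width : Int) (height : Int) (fill : String) (out : List (List String)) : Decidable (Spec_create_rectangle_py width height fill out) := by unfold Spec_create_rectangle_py; infer_instance

-- ===== CLAIM (what is proved, stated in full; the proofs are below) =====
def Claim_equal_create_rectangle_py : Prop := ∀ (width : Int) (height : Int) (fill : String), Dom_create_rectangle_py width height fill → Pre_create_rectangle_py width height fill → Spec_create_rectangle_py width height fill (create_rectangle_py width height fill)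

-- ===== LEMMAS AND PROOFS =====

-- the grid of values f y x for 0 ≤ y < h, 0 ≤ x < w: both ports' results take this shape
def mkGrid (h w : Int) (f : Int → Int → String) : List (List String) :=
  (PySem.List.pyRange 0 h 1).map (fun y => (PySem.List.pyRange 0 w 1).map (fun x => f y x))

lemma setRow (w x : Int) (hx0 : 0 ≤ x) (v : String) (g : Int → String) :
    ((PySem.List.pyRange 0 w 1).map g).set x.toNat v
      = (PySem.List.pyRange 0 w 1).map (fun j => if j = x then v else g j) := by
  apply List.ext_getElem
  · simp
  · intro k hk1 hk2
    simp only [List.length_set, List.length_map, PySem.List.length_pyRange_one] at hk1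
    rw [List.getElem_set, List.getElem_map, List.getElem_map,
        PySem.List.getElem_pyRange_one]
    by_cases hkx : x.toNat = k
    · rw [if_pos hkx, if_pos (show (0:Int) + ↑k = x by omega)]
    · rw [if_neg hkx, if_neg (show ¬((0:Int) + ↑k = x) by omega)]

lemma pySet2_mkGrid (h w y x : Int) (v : String) (f : Int → Int → String)
    (hy0 : 0 ≤ y) (hyh : y < h) (hx0 : 0 ≤ x) (hxw : x < w) :
    pySet2 (mkGrid h w f) y x v
      = mkGrid h w (fun i j => if i = y ∧ j = x then v else f i j) := by
  unfold pySet2 mkGrid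
  rw [PySem.List.pySetD_of_nonneg _ _ hy0, PySem.List.pyGetD_of_nonneg _ _ hy0,
      PySem.List.pySetD_of_nonneg _ _ hx0]
  have hylen : y.toNat < ((PySem.List.pyRange 0 h 1).map
      (fun y => (PySem.List.pyRange 0 w 1).map (fun x => f y x))).length := by
    simp [PySem.List.length_pyRange_one]; omega
  rw [List.getD_eq_getElem _ _ hylen, List.getElem_map, PySem.List.getElem_pyRange_one]
  apply List.ext_getElem
  · simp
  · intro i hi1 hi2
    simp only [List.length_set, List.length_map, PySem.List.length_pyRange_one] at hi1
    rw [List.getElem_set, List.getElem_map, List.getElem_map, PySem.List.getElem_pyRange_one]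
    by_cases hiy : y.toNat = i
    · rw [if_pos hiy]
      have h0y : (0:Int) + ↑y.toNat = y := by omega
      rw [h0y, setRow w x hx0 v (fun j => f y j)]
      refine List.map_congr_left (fun j hj => ?_)
      rw [PySem.List.mem_pyRange_one] at hj
      have : (0:Int) + ↑i = y := by omega
      rw [this]
      by_cases hjx : j = x
      · simp [hjx]
      · simp [hjx]
    · rw [if_neg hiy]
      refine List.map_congr_left (fun j hj => ?_)
      have hne : ¬((0:Int) + ↑i = y ∧ j = x) := by rintro ⟨h1, -⟩; omega
      beta_reduce
      rw [if_neg hne]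

lemma loop1_mkGrid (h w : Int) (hh : 0 < h) :
    ∀ (n : Nat) (a : Int) (f : Int → Int → String), 0 ≤ a → a + n ≤ w →
    (PySem.List.pyRange a (a + n) 1).foldl
      (fun r x => pySet2 (pySet2 r 0 x "-") (h - 1) x "-") (mkGrid h w f)
    = mkGrid h w (fun i j => if (i = 0 ∨ i = h - 1) ∧ a ≤ j ∧ j < a + n then "-" else f i j) := by
  intro n
  induction n with
  | zero =>
    intro a f ha hb
    rw [PySem.List.pyRange_one_eq_nil (by omega)]
    simp only [List.foldl_nil]
    apply congrArg
    funext i j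
    rw [if_neg (by omega)]
  | succ n ih =>
    intro a f ha hb
    rw [PySem.List.pyRange_one_cons (by omega)]
    simp only [List.foldl_cons]
    rw [pySet2_mkGrid h w 0 a "-" f (by omega) (by omega) ha (by omega),
        pySet2_mkGrid h w (h-1) a "-" _ (by omega) (by omega) ha (by omega)]
    have := ih (a+1) (fun i j =>
      if i = h - 1 ∧ j = a then "-" else if i = 0 ∧ j = a then "-" else f i j)
      (by omega) (by omega)
    have harr : a + 1 + (n : Int) = a + ((n:Nat)+1 : Nat) := by push_cast; ring
    rw [harr] at this
    rw [this]
    apply congrArg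
    funext i j
    beta_reduce
    by_cases h1 : (i = 0 ∨ i = h - 1) ∧ a + 1 ≤ j ∧ j < a + ((n:Nat)+1:Nat)
    · rw [if_pos h1, if_pos (by push_cast at h1 ⊢; omega)]
    · rw [if_neg h1]
      by_cases h2 : i = h - 1 ∧ j = a
      · rw [if_pos h2, if_pos (by push_cast; omega)]
      · rw [if_neg h2]
        by_cases h3 : i = 0 ∧ j = a
        · rw [if_pos h3, if_pos (by push_cast; omega)]
        · rw [if_neg h3, if_neg (by push_cast at h1 ⊢; omega)]

lemma loop2_mkGrid (h w : Int) (hw : 0 < w) :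
    ∀ (n : Nat) (a : Int) (f : Int → Int → String), 0 ≤ a → a + n ≤ h →
    (PySem.List.pyRange a (a + n) 1).foldl
      (fun r y => pySet2 (pySet2 r y 0 "|") y (w - 1) "|") (mkGrid h w f)
    = mkGrid h w (fun i j => if (j = 0 ∨ j = w - 1) ∧ a ≤ i ∧ i < a + n then "|" else f i j) := by
  intro n
  induction n with
  | zero =>
    intro a f ha hb
    rw [PySem.List.pyRange_one_eq_nil (by omega)]
    simp only [List.foldl_nil]
    apply congrArg
    funext i j
    rw [if_neg (by omega)]
  | succ n ih =>
    intro a f ha hb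
    rw [PySem.List.pyRange_one_cons (by omega)]
    simp only [List.foldl_cons]
    rw [pySet2_mkGrid h w a 0 "|" f ha (by omega) (by omega) (by omega),
        pySet2_mkGrid h w a (w-1) "|" _ ha (by omega) (by omega) (by omega)]
    have := ih (a+1) (fun i j =>
      if i = a ∧ j = w - 1 then "|" else if i = a ∧ j = 0 then "|" else f i j)
      (by omega) (by omega)
    have harr : a + 1 + (n : Int) = a + ((n:Nat)+1 : Nat) := by push_cast; ring
    rw [harr] at this
    rw [this]
    apply congrArg
    funext i j
    beta_reduce
    by_cases h1 : (j = 0 ∨ j = w - 1) ∧ a + 1 ≤ i ∧ i < a + ((n:Nat)+1:Nat)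
    · rw [if_pos h1, if_pos (by push_cast at h1 ⊢; omega)]
    · rw [if_neg h1]
      by_cases h2 : i = a ∧ j = w - 1
      · rw [if_pos h2, if_pos (by push_cast; omega)]
      · rw [if_neg h2]
        by_cases h3 : i = a ∧ j = 0
        · rw [if_pos h3, if_pos (by push_cast; omega)]
        · rw [if_neg h3, if_neg (by push_cast at h1 ⊢; omega)]

lemma mkGrid_congr (h w : Int) (f g : Int → Int → String)
    (hfg : ∀ y x, 0 ≤ y → y < h → 0 ≤ x → x < w → f y x = g y x) :
    mkGrid h w f = mkGrid h w g := by
  unfold mkGrid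
  refine List.map_congr_left (fun y hy => ?_)
  rw [PySem.List.mem_pyRange_one] at hy
  refine List.map_congr_left (fun x hx => ?_)
  rw [PySem.List.mem_pyRange_one] at hx
  exact hfg y x hy.1 hy.2 hx.1 hx.2

lemma ports_agree (w h : Int) (fill : String) (hw : 1 ≤ w) (hh : 1 ≤ h) :
    create_rectangle_py w h fill = create_rectangle_py_alt w h fill := by
  have hr1 : PySem.List.pyRange 1 (w - 1) 1 = PySem.List.pyRange 1 (1 + (((w-2).toNat : Nat) : Int)) 1 := by
    by_cases h2 : 2 ≤ w
    · congr 1; omega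
    · rw [PySem.List.pyRange_one_eq_nil (by omega), PySem.List.pyRange_one_eq_nil (by omega)]
  have hr2 : PySem.List.pyRange 1 (h - 1) 1 = PySem.List.pyRange 1 (1 + (((h-2).toNat : Nat) : Int)) 1 := by
    by_cases h2 : 2 ≤ h
    · congr 1; omega
    · rw [PySem.List.pyRange_one_eq_nil (by omega), PySem.List.pyRange_one_eq_nil (by omega)]
  show ([((0:Int),(0:Int)), (0, w - 1), (h - 1, 0), (h - 1, w - 1)].foldl
    (fun r p => pySet2 r p.1 p.2 "+")
    ((PySem.List.pyRange 1 (h - 1) 1).foldl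
      (fun r y => pySet2 (pySet2 r y 0 "|") y (w - 1) "|")
      ((PySem.List.pyRange 1 (w - 1) 1).foldl
        (fun r x => pySet2 (pySet2 r 0 x "-") (h - 1) x "-")
        (mkGrid h w (fun _ _ => fill))))) = mkGrid h w (cellB w h fill)
  rw [hr1, loop1_mkGrid h w (by omega) ((w-2).toNat) 1 _ (by omega) (by omega)]
  rw [hr2, loop2_mkGrid h w (by omega) ((h-2).toNat) 1 _ (by omega) (by omega)]
  simp only [List.foldl_cons, List.foldl_nil]
  rw [pySet2_mkGrid h w 0 0 "+" _ (by omega) (by omega) (by omega) (by omega),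
      pySet2_mkGrid h w 0 (w-1) "+" _ (by omega) (by omega) (by omega) (by omega),
      pySet2_mkGrid h w (h-1) 0 "+" _ (by omega) (by omega) (by omega) (by omega),
      pySet2_mkGrid h w (h-1) (w-1) "+" _ (by omega) (by omega) (by omega) (by omega)]
  apply mkGrid_congr
  intro i j hi0 hih hj0 hjw
  beta_reduce
  simp only [cellB, Bool.and_eq_true, Bool.or_eq_true, beq_iff_eq]
  split_ifs <;> first | rfl | omega

-- ===== VERDICT (by name: the statement is the Claim_ definition above) =====
theorem create_rectangle_py_spec : Claim_equal_create_rectangle_py := by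
  intro w h fill _ hpre
  unfold Pre_create_rectangle_py at hpre
  unfold Spec_create_rectangle_py
  exact ports_agree w h fill hpre.1 hpre.2
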